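-- pv_equiv track=rewrite | github.com/anjli01/Python-Functions | 38.py | summarize_ranges
-- ===== SOURCE A (Python) =====
-- from typing import List, Dict, Any, Union, Tuple, Iterable, TypeVar, Optional
--
-- def summarize_ranges(nums: List[int]) -> List[str]:
--     """
--     Given a sorted integer list without duplicates, return the summary of its ranges.
--     Example: [0,1,2,4,5,7] -> ["0->2", "4->5", "7"]
--
--     Args:
--         nums: A sorted list of unique integers.
--
--     Returns:
--         A list of strings representing the ranges.
--     """
--     if not nums:
--         return []
--
--     ranges = []
--     start = nums[0]
--
--     for i in range(1, len(nums)):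
--         if nums[i] != nums[i-1] + 1:
--             end = nums[i-1]
--             if start == end:
--                 ranges.append(str(start))
--             else:
--                 ranges.append(f"{start}->{end}")
--             start = nums[i]
--
--     # Add the last range
--     if start == nums[-1]:
--         ranges.append(str(start))
--     else:
--         ranges.append(f"{start}->{nums[-1]}")
--
--     return ranges
-- ===== SOURCE B (Python) =====
-- def summarize_ranges(nums):
--     # Pass 1: indices where the consecutive chain breaks.
--     # Pass 2: format each segment delimited by consecutive boundary pairs.
--     n = len(nums)
--     if n == 0:
--         return []
--     cuts = [i for i in range(1, n) if nums[i] != nums[i - 1] + 1]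
--     bounds = [0] + cuts + [n]
--     return [str(nums[lo]) if nums[lo] == nums[hi - 1] else f"{nums[lo]}->{nums[hi - 1]}"
--             for lo, hi in zip(bounds, bounds[1:])]
-- ===== Notes on version B (the rewrite author's own statement) =====
-- stated objective: simpler
-- what changed: Replaces A's incremental loop with a running start variable and a separate trailing last-range code path by two staged passes: a comprehension collecting the break indices, then uniform formatting of the segments delimited by zipped boundary pairs.
import Mathlib
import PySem

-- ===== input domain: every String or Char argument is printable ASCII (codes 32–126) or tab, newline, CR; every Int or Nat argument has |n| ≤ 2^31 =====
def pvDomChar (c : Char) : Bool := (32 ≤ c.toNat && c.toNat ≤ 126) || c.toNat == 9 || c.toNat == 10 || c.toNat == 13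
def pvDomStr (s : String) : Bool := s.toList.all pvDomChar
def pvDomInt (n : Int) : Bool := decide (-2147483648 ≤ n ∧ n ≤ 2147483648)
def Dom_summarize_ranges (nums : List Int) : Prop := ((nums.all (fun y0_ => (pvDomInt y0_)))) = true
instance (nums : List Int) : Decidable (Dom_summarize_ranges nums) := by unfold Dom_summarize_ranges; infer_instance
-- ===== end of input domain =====

-- B replaces A's incremental loop (running start variable + trailing last-range code
-- path) by two staged passes: collect break indices, then format boundary-pair segments.

-- shared formatting helper: Python's  str(a) if a == b else f"{a}->{b}"
def pvFmt (a b : Int) : String :=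
  if a = b then PySem.Int.toStr a else PySem.Int.toStr a ++ "->" ++ PySem.Int.toStr b

-- ===== PORT A =====
-- literal port: loop over range(1, len(nums)) with state (ranges, start), reading nums[i], nums[i-1]
def summarize_ranges (nums : List Int) : List String :=
  if nums = [] then []
  else
    let start0 := PySem.List.pyGetD nums 0 0
    let res := (PySem.List.pyRange 1 (nums.length : Int) 1).foldl
      (fun (st : List String × Int) i =>
        if PySem.List.pyGetD nums i 0 ≠ PySem.List.pyGetD nums (i-1) 0 + 1 then
          (st.1 ++ [pvFmt st.2 (PySem.List.pyGetD nums (i-1) 0)], PySem.List.pyGetD nums i 0)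
        else st) ([], start0)
    res.1 ++ [pvFmt res.2 (PySem.List.pyGetD nums (-1) 0)]

-- ===== PORT B =====
-- literal port of Source B: cuts = break-index comprehension, bounds = [0]+cuts+[n],
-- then format the segment of each boundary pair from zip(bounds, bounds[1:])
def summarize_ranges_alt (nums : List Int) : List String :=
  let n : Int := nums.length
  if n = 0 then []
  else
    let cuts := (PySem.List.pyRange 1 n 1).filter
      (fun i => PySem.List.pyGetD nums i 0 != PySem.List.pyGetD nums (i-1) 0 + 1)
    let bounds := [(0 : Int)] ++ cuts ++ [n]
    (bounds.zip (PySem.List.slice bounds (some 1) none)).map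
      (fun p => pvFmt (PySem.List.pyGetD nums p.1 0) (PySem.List.pyGetD nums (p.2 - 1) 0))

-- ===== PRECONDITION & SPEC =====
def Spec_summarize_ranges (nums : List Int) (out : List String) : Prop := out = summarize_ranges_alt nums
instance (nums : List Int) (out : List String) : Decidable (Spec_summarize_ranges nums out) := by unfold Spec_summarize_ranges; infer_instance

-- ===== CLAIM (what is proved, stated in full; the proofs are below) =====
def Claim_equal_summarize_ranges : Prop := ∀ (nums : List Int), Dom_summarize_ranges nums → Spec_summarize_ranges nums (summarize_ranges nums)

-- ===== LEMMAS AND PROOFS =====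

-- one A-loop body step, with the two reads nums[i-1], nums[i] passed in
def pvStepA (st : List String × Int) (p c : Int) : List String × Int :=
  if c ≠ p + 1 then (st.1 ++ [pvFmt st.2 p], c) else st

-- reference shape: the list of maximal consecutive runs of b :: l, current run started at a, last element b
def pvGo (a b : Int) : List Int → List (Int × Int)
  | [] => [(a, b)]
  | v :: l => if v = b + 1 then pvGo a v l else (a, b) :: pvGo v v l

-- reference break positions: pvCuts i b l = indices (i = index of l's head, b right before) where the chain breaks
def pvCuts : Nat → Int → List Int → List Int
  | _, _, [] => []
  | i, b, v :: l => if v = b + 1 then pvCuts (i+1) v l else (i : Int) :: pvCuts (i+1) v l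

-- facts about drop as "suffix view"
lemma pvDrop_getD {nums : List Int} {i : Nat} {b : Int} {l : List Int}
    (h : nums.drop i = b :: l) : nums.getD i 0 = b := by
  have h0 : nums[i]? = some b := by
    have h1 : (nums.drop i)[0]? = some b := by rw [h]; rfl
    rw [List.getElem?_drop] at h1
    simpa using h1
  simp [List.getD_eq_getElem?_getD, h0]

lemma pvDrop_succ {nums : List Int} {i : Nat} {b : Int} {l : List Int}
    (h : nums.drop i = b :: l) : nums.drop (i+1) = l := by
  have : nums.drop (i+1) = (nums.drop i).drop 1 := by
    rw [List.drop_drop]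
  rw [this, h]; rfl

lemma pvDrop_len {nums : List Int} {i : Nat} {b : Int} {l : List Int}
    (h : nums.drop i = b :: l) : nums.length = i + 1 + l.length := by
  have hlen : nums.length - i = l.length + 1 := by
    have := congrArg List.length h; simpa using this
  have hle : i < nums.length := by
    by_contra hc
    rw [List.drop_eq_nil_of_le (Nat.le_of_not_lt hc)] at h
    exact (List.cons_ne_nil _ _) h.symm
  omega

-- A's pair-fold (with the trailing append) computes pvGo, formatted
lemma pvA_pairs (l : List Int) : ∀ (a b : Int) (acc : List String),
    (((b :: l).zip l).foldl (fun st p => pvStepA st p.1 p.2) (acc, a)).1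
      ++ [pvFmt ((((b :: l).zip l).foldl (fun st p => pvStepA st p.1 p.2) (acc, a))).2 (l.getLastD b)]
    = acc ++ (pvGo a b l).map (fun p => pvFmt p.1 p.2) := by
  induction l with
  | nil => intro a b acc; simp [pvGo]
  | cons c l ih =>
    intro a b acc
    simp only [List.zip_cons_cons, List.foldl_cons, List.getLastD_cons]
    by_cases h : c = b + 1
    · have hstep : pvStepA (acc, a) b c = (acc, a) := by
        simp [pvStepA, h]
      rw [hstep, ih a c acc, pvGo, if_pos h]
    · have hstep : pvStepA (acc, a) b c = (acc ++ [pvFmt a b], c) := by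
        simp [pvStepA, h]
      rw [hstep, ih c c (acc ++ [pvFmt a b]), pvGo, if_neg h]
      simp [List.append_assoc]

-- bridge: A's index fold over range(1, len nums) IS the fold over adjacent pairs
lemma pvA_index_to_pairs (x : Int) (l : List Int) (init : List String × Int) :
    (PySem.List.pyRange 1 ((x :: l).length : Int) 1).foldl
      (fun st i => pvStepA st (PySem.List.pyGetD (x :: l) (i-1) 0) (PySem.List.pyGetD (x :: l) i 0)) init
    = ((x :: l).zip l).foldl (fun st p => pvStepA st p.1 p.2) init := by
  have hlen : (PySem.List.pyRange 1 ((x :: l).length : Int) 1).length = l.length := by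
    rw [PySem.List.length_pyRange_one]; simp
  have hmap : (PySem.List.pyRange 1 ((x :: l).length : Int) 1).map
      (fun i => (PySem.List.pyGetD (x :: l) (i-1) 0, PySem.List.pyGetD (x :: l) i 0))
      = (x :: l).zip l := by
    apply List.ext_getElem
    · simp
    · intro k h1 h2
      have hk : k < l.length := by simpa [hlen] using h1
      have h1' : k < (PySem.List.pyRange 1 ((x :: l).length : Int) 1).length := by
        rw [hlen]; exact hk
      have hr : (PySem.List.pyRange 1 ((x :: l).length : Int) 1)[k]'h1' = 1 + k :=
        PySem.List.getElem_pyRange_one (a := 1) (b := ((x :: l).length : Int)) (k := k) h1'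
      simp only [List.getElem_map, hr]
      have e1 : (1 + (k : Int)) - 1 = ((k : Nat) : Int) := by ring
      have e2 : (1 + (k : Int)) = (((k + 1 : Nat)) : Int) := by push_cast; ring
      rw [e1, e2, PySem.List.pyGetD_natCast, PySem.List.pyGetD_natCast]
      have g1 : (x :: l).getD k 0 = (x :: l)[k]'(by simp; omega) := List.getD_eq_getElem _ _ _
      have g2 : (x :: l).getD (k+1) 0 = (x :: l)[k+1]'(by simp; omega) := List.getD_eq_getElem _ _ _
      rw [g1, g2]
      simp [List.getElem_zip]
  conv_rhs => rw [← hmap]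
  rw [List.foldl_map]

lemma pvGetD_neg_one_cons (x : Int) (l : List Int) :
    PySem.List.pyGetD (x :: l) (-1) 0 = l.getLastD x := by
  have h := PySem.List.pyGetD_neg_one (xs := x :: l) (d := 0) (by simp)
  rw [h]
  exact List.getLast_eq_getLastD _

-- B's filtered range computes pvCuts
lemma pvB_cuts (l : List Int) : ∀ (i : Nat) (b : Int) (nums : List Int),
    nums.drop i = b :: l →
    (PySem.List.pyRange ((i : Int) + 1) (nums.length : Int) 1).filter
        (fun j => PySem.List.pyGetD nums j 0 != PySem.List.pyGetD nums (j-1) 0 + 1)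
      = pvCuts (i+1) b l := by
  induction l with
  | nil =>
    intro i b nums h
    have hlen := pvDrop_len h
    simp only [List.length_nil] at hlen
    rw [PySem.List.pyRange_one_eq_nil (by omega)]
    rfl
  | cons v l ih =>
    intro i b nums h
    have hlen := pvDrop_len h
    have hd1 : nums.drop (i+1) = v :: l := pvDrop_succ h
    have hgi : nums.getD i 0 = b := pvDrop_getD h
    have hgi1 : nums.getD (i+1) 0 = v := pvDrop_getD hd1
    rw [PySem.List.pyRange_one_cons (by simp at hlen ⊢; omega)]
    rw [List.filter_cons]
    have e1 : (i : Int) + 1 = ((i + 1 : Nat) : Int) := by push_cast; ring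
    have e2 : ((i + 1 : Nat) : Int) - 1 = ((i : Nat) : Int) := by push_cast; ring
    have hpred : (PySem.List.pyGetD nums ((i : Int) + 1) 0 != PySem.List.pyGetD nums ((i : Int) + 1 - 1) 0 + 1)
        = !(v = b + 1 : Bool) := by
      rw [e1, e2, PySem.List.pyGetD_natCast, PySem.List.pyGetD_natCast, hgi, hgi1]
      simp only [bne]
      rfl
    rw [hpred]
    have htail : (PySem.List.pyRange ((i : Int) + 1 + 1) (nums.length : Int) 1).filter
        (fun j => PySem.List.pyGetD nums j 0 != PySem.List.pyGetD nums (j-1) 0 + 1)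
        = pvCuts (i+1+1) v l := by
      have e3 : (i : Int) + 1 + 1 = (((i + 1 : Nat)) : Int) + 1 := by omega
      rw [e3]; exact ih (i+1) v nums hd1
    by_cases hv : v = b + 1
    · rw [if_neg (by simp [hv])]
      rw [htail]
      simp [pvCuts, hv]
    · rw [if_pos (by simp [hv])]
      rw [htail]
      simp [pvCuts, hv]

-- B's boundary-pair segments compute pvGo, formatted
lemma pvB_segs (l : List Int) : ∀ (i : Nat) (s a b : Int) (nums : List Int),
    nums.drop i = b :: l → PySem.List.pyGetD nums s 0 = a →
    ((s :: (pvCuts (i+1) b l ++ [(nums.length : Int)])).zip (pvCuts (i+1) b l ++ [(nums.length : Int)])).map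
        (fun p => pvFmt (PySem.List.pyGetD nums p.1 0) (PySem.List.pyGetD nums (p.2 - 1) 0))
      = (pvGo a b l).map (fun p => pvFmt p.1 p.2) := by
  induction l with
  | nil =>
    intro i s a b nums h hs
    have hlen := pvDrop_len h
    have hgi : nums.getD i 0 = b := pvDrop_getD h
    have e1 : ((nums.length : Int)) - 1 = ((i : Nat) : Int) := by
      simp only [List.length_nil] at hlen
      omega
    simp only [pvCuts, List.nil_append, List.zip_cons_cons, List.zip_nil_right, List.map_cons,
      List.map_nil, pvGo]
    rw [e1, PySem.List.pyGetD_natCast, hgi, hs]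
  | cons v l ih =>
    intro i s a b nums h hs
    have hd1 : nums.drop (i+1) = v :: l := pvDrop_succ h
    have hgi : nums.getD i 0 = b := pvDrop_getD h
    have hgi1 : nums.getD (i+1) 0 = v := pvDrop_getD hd1
    by_cases hv : v = b + 1
    · have hc : pvCuts (i+1) b (v :: l) = pvCuts (i+1+1) v l := by simp [pvCuts, hv]
      rw [hc, pvGo, if_pos hv]
      exact ih (i+1) s a v nums hd1 hs
    · have hc : pvCuts (i+1) b (v :: l) = ((i+1 : Nat) : Int) :: pvCuts (i+1+1) v l := by
        simp [pvCuts, hv]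
      rw [hc, pvGo, if_neg hv]
      simp only [List.cons_append, List.zip_cons_cons, List.map_cons]
      have e2 : (((i+1 : Nat) : Int)) - 1 = ((i : Nat) : Int) := by omega
      rw [e2, PySem.List.pyGetD_natCast, hgi, hs]
      have hsv : PySem.List.pyGetD nums (((i+1 : Nat) : Int)) 0 = v := by
        rw [PySem.List.pyGetD_natCast, hgi1]
      have := ih (i+1) (((i+1 : Nat) : Int)) v v nums hd1 hsv
      rw [this]

-- ===== VERDICT (by name: the statement is the Claim_ definition above) =====
theorem summarize_ranges_spec : Claim_equal_summarize_ranges := by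
  intro nums _
  unfold Spec_summarize_ranges
  cases nums with
  | nil => rfl
  | cons x l =>
    show summarize_ranges (x :: l) = summarize_ranges_alt (x :: l)
    unfold summarize_ranges summarize_ranges_alt
    rw [if_neg (List.cons_ne_nil x l)]
    rw [if_neg (show ¬(((x :: l).length : Int) = 0) by
      simp only [List.length_cons]; omega)]
    -- A side
    have hA : (fun (st : List String × Int) i =>
        if PySem.List.pyGetD (x :: l) i 0 ≠ PySem.List.pyGetD (x :: l) (i-1) 0 + 1 then
          (st.1 ++ [pvFmt st.2 (PySem.List.pyGetD (x :: l) (i-1) 0)], PySem.List.pyGetD (x :: l) i 0)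
        else st)
        = (fun st i => pvStepA st (PySem.List.pyGetD (x :: l) (i-1) 0) (PySem.List.pyGetD (x :: l) i 0)) := by
      funext st i; simp [pvStepA]
    simp only [hA, PySem.List.pyGetD_zero_cons, pvA_index_to_pairs, pvGetD_neg_one_cons]
    rw [pvA_pairs l x x []]
    -- B side
    have hdrop0 : (x :: l).drop 0 = x :: l := by simp
    have hcuts : (PySem.List.pyRange 1 (((x :: l).length : Nat) : Int) 1).filter
        (fun j => PySem.List.pyGetD (x :: l) j 0 != PySem.List.pyGetD (x :: l) (j-1) 0 + 1)
        = pvCuts 1 x l := by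
      have := pvB_cuts l 0 x (x :: l) hdrop0
      simpa using this
    rw [hcuts, PySem.List.slice_from_one]
    simp only [List.singleton_append, List.nil_append]
    have hs0 : PySem.List.pyGetD (x :: l) (0 : Int) 0 = x := PySem.List.pyGetD_zero_cons x l 0
    exact (pvB_segs l 0 (0 : Int) x x (x :: l) hdrop0 hs0).symm
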